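-- pv_equiv track=rewrite | github.com/Mlaiel/Spotify-AI-Agent-Backend | backend/app/tenancy/compliance/compliance_reporting.py | _generate_heatmap_colors
-- ===== SOURCE A (Python) =====
-- from typing import Dict, List, Optional, Any, Union, Tuple, Set
--
-- def _generate_heatmap_colors(data: List[Dict]) -> List[str]:
--     """Génération des couleurs pour heatmap"""
--     colors = []
--     for item in data:
--         risk_level = item.get('risk_level', 0)
--         if risk_level >= 8:
--             colors.append('#f44336')  # Rouge
--         elif risk_level >= 6:
--             colors.append('#ff9800')  # Orange
--         elif risk_level >= 4:
--             colors.append('#ffeb3b')  # Jaune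
--         else:
--             colors.append('#4caf50')  # Vert
--     return colors
-- ===== SOURCE B (Python) =====
-- from typing import Dict, List
--
-- def _generate_heatmap_colors(data: List[Dict]) -> List[str]:
--     # Layered painting: start every cell green, then repaint in three passes,
--     # one per severity layer, overwriting cells whose risk reaches the layer.
--     colors = ['#4caf50'] * len(data)
--     for threshold, color in ((4, '#ffeb3b'), (6, '#ff9800'), (8, '#f44336')):
--         for i, item in enumerate(data):
--             if item.get('risk_level', 0) >= threshold:
--                 colors[i] = color
--     return colors
-- ===== Notes on version B (the rewrite author's own statement) =====
-- stated objective: alternative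
-- what changed: Replaces A's single-pass per-item if/elif classification with layered painting: initialize all cells green, then three full overwrite passes (one per threshold layer) repaint every cell whose risk level reaches that layer.
import Mathlib
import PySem

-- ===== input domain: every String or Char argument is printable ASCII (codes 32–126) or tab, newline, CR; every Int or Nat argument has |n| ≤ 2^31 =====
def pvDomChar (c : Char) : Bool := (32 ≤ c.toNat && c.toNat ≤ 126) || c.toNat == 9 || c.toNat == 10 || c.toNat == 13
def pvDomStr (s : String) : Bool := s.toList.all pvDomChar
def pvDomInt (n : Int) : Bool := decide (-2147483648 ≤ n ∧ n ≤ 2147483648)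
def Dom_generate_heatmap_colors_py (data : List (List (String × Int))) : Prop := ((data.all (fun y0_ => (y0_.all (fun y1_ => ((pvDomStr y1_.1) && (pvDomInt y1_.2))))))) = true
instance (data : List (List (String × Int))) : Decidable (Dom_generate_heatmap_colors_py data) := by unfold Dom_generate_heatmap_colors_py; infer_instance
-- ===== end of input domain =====

-- Header: B uses layered painting (all green, then three overwrite passes, one per
-- threshold layer) instead of A's per-item if/elif cascade; same values, same O(n) cost.
-- ===== PORT A =====
def generate_heatmap_colors_py (data : List (List (String × Int))) : List String :=
  data.foldl (fun colors item =>
    let risk_level := (PySem.Dict.mk item).getD "risk_level" 0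
    if risk_level ≥ 8 then colors ++ ["#f44336"]
    else if risk_level ≥ 6 then colors ++ ["#ff9800"]
    else if risk_level ≥ 4 then colors ++ ["#ffeb3b"]
    else colors ++ ["#4caf50"]) []

-- ===== PORT B =====
-- one overwrite pass: for i, item in enumerate(data): if risk ≥ th: colors[i] = color
-- (Python's in-place colors[i] = color over an equal-length list is exactly this
--  pointwise map over the zip of the current colors with data)
def pvPass (th : Int) (color : String) (colors : List String)
    (data : List (List (String × Int))) : List String :=
  (colors.zip data).map (fun p =>
    if (PySem.Dict.mk p.2).getD "risk_level" 0 ≥ th then color else p.1)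

def generate_heatmap_colors_py_alt (data : List (List (String × Int))) : List String :=
  [((4 : Int), "#ffeb3b"), (6, "#ff9800"), (8, "#f44336")].foldl
    (fun colors tc => pvPass tc.1 tc.2 colors data)
    (List.replicate data.length "#4caf50")

-- ===== PRECONDITION & SPEC =====
def Spec_generate_heatmap_colors_py (data : List (List (String × Int))) (out : List String) : Prop := out = generate_heatmap_colors_py_alt data
instance (data : List (List (String × Int))) (out : List String) : Decidable (Spec_generate_heatmap_colors_py data out) := by unfold Spec_generate_heatmap_colors_py; infer_instance

-- ===== CLAIM =====
def Claim_equal_generate_heatmap_colors_py : Prop := ∀ (data : List (List (String × Int))), Dom_generate_heatmap_colors_py data → Spec_generate_heatmap_colors_py data (generate_heatmap_colors_py data)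

-- ===== LEMMAS AND PROOFS =====
theorem pvPass_cons (th : Int) (color a : String) (cs : List String)
    (i : List (String × Int)) (ds : List (List (String × Int))) :
    pvPass th color (a :: cs) (i :: ds)
    = (if (PySem.Dict.mk i).getD "risk_level" 0 ≥ th then color else a) :: pvPass th color cs ds := by
  simp [pvPass]

theorem pv_alt_cons (i : List (String × Int)) (ds : List (List (String × Int))) :
    generate_heatmap_colors_py_alt (i :: ds)
    = (let r := (PySem.Dict.mk i).getD "risk_level" 0
       if r ≥ 8 then "#f44336"
       else if r ≥ 6 then "#ff9800"
       else if r ≥ 4 then "#ffeb3b"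
       else "#4caf50") :: generate_heatmap_colors_py_alt ds := by
  simp only [generate_heatmap_colors_py_alt, List.foldl, List.length_cons,
    List.replicate_succ, pvPass_cons]

theorem pv_foldl_acc (data : List (List (String × Int))) (acc : List String) :
    data.foldl (fun colors item =>
      let risk_level := (PySem.Dict.mk item).getD "risk_level" 0
      if risk_level ≥ 8 then colors ++ ["#f44336"]
      else if risk_level ≥ 6 then colors ++ ["#ff9800"]
      else if risk_level ≥ 4 then colors ++ ["#ffeb3b"]
      else colors ++ ["#4caf50"]) acc
    = acc ++ generate_heatmap_colors_py_alt data := by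
  induction data generalizing acc with
  | nil => simp [generate_heatmap_colors_py_alt, pvPass]
  | cons item rest ih =>
    rw [pv_alt_cons]
    simp only [List.foldl]
    rw [ih]
    split_ifs <;> simp_all

-- ===== VERDICT =====
theorem generate_heatmap_colors_py_spec : Claim_equal_generate_heatmap_colors_py := by
  intro data _
  unfold Spec_generate_heatmap_colors_py generate_heatmap_colors_py
  simpa using pv_foldl_acc data []
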